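-- pv_equiv track=rewrite | github.com/qnlewis/py-learning-exercises | fun-002-patterns-c-main/fun-002-patterns-c-main/patterns.py | draw_triangle_reversed
-- ===== SOURCE A (Python) =====
-- def draw_triangle_reversed(height: int) -> str:
--     if height <= 0:
--         return ""
--     result = []
--     for i in range(height, 0, -1):
--         row = "".join(str(num) for num in range(i, 0, -1))
--         result.append(row)
--     return "\n".join(result)
-- ===== SOURCE B (Python) =====
-- def draw_triangle_reversed(height: int) -> str:
--     if height <= 0:
--         return ""
--     acc = ""
--     rows = []
--     for v in range(1, height + 1):
--         acc = str(v) + acc      # reuse previous row: row(v) = str(v) + row(v-1)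
--         rows.append(acc)
--     return "\n".join(reversed(rows))
-- ===== Notes on version B (the rewrite author's own statement) =====
-- stated objective: alternative
-- what changed: Instead of recomputing each row with an inner countdown loop, B maintains one running row string (row(v) = str(v) + row(v-1)) in a single ascending pass and reverses the collected rows at the end.
import Mathlib
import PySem

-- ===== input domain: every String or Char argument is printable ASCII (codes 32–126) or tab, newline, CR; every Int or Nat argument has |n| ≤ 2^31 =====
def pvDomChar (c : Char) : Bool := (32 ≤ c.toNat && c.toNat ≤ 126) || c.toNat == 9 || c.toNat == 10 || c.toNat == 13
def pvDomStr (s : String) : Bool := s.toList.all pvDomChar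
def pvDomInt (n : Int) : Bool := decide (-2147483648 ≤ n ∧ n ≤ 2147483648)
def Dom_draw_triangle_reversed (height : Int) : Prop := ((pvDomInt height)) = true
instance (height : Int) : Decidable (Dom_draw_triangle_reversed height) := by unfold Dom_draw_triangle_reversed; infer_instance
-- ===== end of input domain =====

-- B replaces A's per-row inner countdown loop by a single ascending pass that reuses the
-- previous row (row(v) = str(v) + row(v-1)) and reverses the collected rows at the end.

-- ===== PORT A =====
def draw_triangle_reversed (height : Int) : String :=
  if height ≤ 0 then ""
  else
    let result := (PySem.List.pyRange height 0 (-1)).foldl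
      (fun acc i =>
        acc ++ [PySem.Str.join "" ((PySem.List.pyRange i 0 (-1)).map PySem.Int.toStr)]) []
    PySem.Str.join "\n" result

-- ===== PORT B =====
def draw_triangle_reversed_alt (height : Int) : String :=
  if height ≤ 0 then ""
  else
    let st := (PySem.List.pyRange 1 (height + 1) 1).foldl
      (fun (st : String × List String) v =>
        let acc := PySem.Int.toStr v ++ st.1
        (acc, st.2 ++ [acc])) ("", [])
    PySem.Str.join "\n" st.2.reverse

-- ===== PRECONDITION & SPEC =====
def Spec_draw_triangle_reversed (height : Int) (out : String) : Prop := out = draw_triangle_reversed_alt height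
instance (height : Int) (out : String) : Decidable (Spec_draw_triangle_reversed height out) := by unfold Spec_draw_triangle_reversed; infer_instance

-- ===== CLAIM (what is proved, stated in full; the proofs are below) =====
def Claim_equal_draw_triangle_reversed : Prop := ∀ (height : Int), Dom_draw_triangle_reversed height → Spec_draw_triangle_reversed height (draw_triangle_reversed height)

-- ===== LEMMAS AND PROOFS =====

-- the accumulated row: rowStr v = str(v) ++ str(v-1) ++ … ++ str(1)
def rowStr : Nat → String
  | 0 => ""
  | v + 1 => PySem.Int.toStr ((v : Int) + 1) ++ rowStr v

theorem join_empty_cons (s : String) (l : List String) :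
    PySem.Str.join "" (s :: l) = s ++ PySem.Str.join "" l := by
  cases l with
  | nil => simp [PySem.Str.join, PySem.Chars.join, List.intercalate]
  | cons t r =>
      simp only [PySem.Str.join, List.map_cons, PySem.Chars.join_cons_cons]
      simp

theorem rowA_eq (v : Nat) :
    PySem.Str.join "" ((PySem.List.pyRange (v : Int) 0 (-1)).map PySem.Int.toStr) = rowStr v := by
  induction v with
  | zero =>
      rw [PySem.List.pyRange_neg_one_eq_nil (by norm_num)]
      simp [rowStr, PySem.Str.join, PySem.Chars.join, List.intercalate]
  | succ v ih =>
      have h1 : ((v + 1 : Nat) : Int) = (v : Int) + 1 := by push_cast; ring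
      have h2 : (v : Int) + 1 - 1 = (v : Int) := by ring
      rw [h1, PySem.List.pyRange_neg_one_cons (by omega), h2, List.map_cons,
        join_empty_cons, ih]
      rfl

theorem foldl_snoc {α β : Type} (f : α → β) (l : List α) (init : List β) :
    l.foldl (fun acc i => acc ++ [f i]) init = init ++ l.map f := by
  induction l generalizing init with
  | nil => simp
  | cons x xs ih => simp [List.foldl_cons, ih, List.append_assoc]

theorem rowsA_eq (n : Nat) :
    (PySem.List.pyRange (n : Int) 0 (-1)).map
        (fun i => PySem.Str.join "" ((PySem.List.pyRange i 0 (-1)).map PySem.Int.toStr))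
      = ((List.range n).map (fun k => rowStr (k + 1))).reverse := by
  induction n with
  | zero =>
      rw [PySem.List.pyRange_neg_one_eq_nil (by norm_num)]
      simp
  | succ n ih =>
      have h1 : ((n + 1 : Nat) : Int) = (n : Int) + 1 := by push_cast; ring
      have h2 : (n : Int) + 1 - 1 = (n : Int) := by ring
      rw [h1, PySem.List.pyRange_neg_one_cons (by omega), h2, List.map_cons, ih,
        List.range_succ]
      have h2 : PySem.Str.join ""
          ((PySem.List.pyRange ((n : Int) + 1) 0 (-1)).map PySem.Int.toStr) = rowStr (n + 1) := by
        rw [← h1, rowA_eq]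
      simp [h2]

theorem loopB_eq (n : Nat) :
    (PySem.List.pyRange 1 ((n : Int) + 1) 1).foldl
        (fun (st : String × List String) v =>
          let acc := PySem.Int.toStr v ++ st.1
          (acc, st.2 ++ [acc])) ("", [])
      = (rowStr n, (List.range n).map (fun k => rowStr (k + 1))) := by
  induction n with
  | zero =>
      rw [PySem.List.pyRange_one_eq_nil (by norm_num)]
      simp [rowStr]
  | succ n ih =>
      have h1 : ((n + 1 : Nat) : Int) = (n : Int) + 1 := by push_cast; ring
      rw [h1, PySem.List.pyRange_one_succ_right (by omega), List.foldl_append, ih]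
      simp [List.foldl_cons, List.range_succ, rowStr]

-- ===== VERDICT (by name: the statement is the Claim_ definition above) =====
theorem draw_triangle_reversed_spec : Claim_equal_draw_triangle_reversed := by
  intro height _
  unfold Spec_draw_triangle_reversed draw_triangle_reversed draw_triangle_reversed_alt
  by_cases h : height ≤ 0
  · simp [h]
  · simp only [h]
    obtain ⟨n, rfl⟩ : ∃ n : Nat, height = (n : Int) :=
      ⟨height.toNat, (Int.toNat_of_nonneg (by omega)).symm⟩
    rw [foldl_snoc, loopB_eq, rowsA_eq]
    simp
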